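-- pv_equiv track=rewrite | github.com/Jo-dv/Algorithm_Study | Python/프로그래머스/Lv 2/더 맵게.py | solution
-- ===== SOURCE A (Python) =====
-- import heapq
--
-- def solution(scoville, K):
--     answer = 0
--     heapq.heapify(scoville)
--
--     while True:
--         if len(scoville) == 1 and scoville[0] < K:
--             answer = -1
--             break
--         if scoville[0] >= K:
--             break
--
--         x1 = heapq.heappop(scoville)
--         x2 = heapq.heappop(scoville)
--         heapq.heappush(scoville, x1 + x2 * 2)
--         answer += 1
--
--     return answer
-- ===== SOURCE B (Python) =====
-- def solution(scoville, K):
--     scoville.sort()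
--     answer = 0
--     while scoville[0] < K:
--         if len(scoville) == 1:
--             return -1
--         x1 = scoville.pop(0)
--         x2 = scoville.pop(0)
--         new = x1 + x2 * 2
--         i = 0
--         while i < len(scoville) and scoville[i] < new:
--             i += 1
--         scoville.insert(i, new)
--         answer += 1
--     return answer
-- ===== Notes on version B (the rewrite author's own statement) =====
-- stated objective: alternative
-- what changed: B replaces A's heapq binary heap with a sorted list kept in order: sort once, pop the two smallest from the front, and re-insert the mix by a linear sorted insertion; the loop is restructured as 'while scoville[0] < K' with early returns instead of A's 'while True' with breaks.
import Mathlib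
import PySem

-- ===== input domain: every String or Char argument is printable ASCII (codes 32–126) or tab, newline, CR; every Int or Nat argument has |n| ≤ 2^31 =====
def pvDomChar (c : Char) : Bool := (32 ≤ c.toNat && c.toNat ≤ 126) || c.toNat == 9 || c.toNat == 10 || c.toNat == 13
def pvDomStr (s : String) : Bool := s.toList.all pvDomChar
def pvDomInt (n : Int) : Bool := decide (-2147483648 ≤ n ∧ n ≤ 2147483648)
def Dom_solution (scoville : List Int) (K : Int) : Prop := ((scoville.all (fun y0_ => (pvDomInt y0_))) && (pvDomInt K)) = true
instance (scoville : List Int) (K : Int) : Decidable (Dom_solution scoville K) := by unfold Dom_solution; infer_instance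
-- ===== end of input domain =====

-- B replaces A's binary heap with a once-sorted list (pop the two smallest from the front,
-- re-insert the mix by a linear sorted insertion): an alternative data structure, same return
-- value; both A and B mutate the argument list in place (A leaves heap order, B sorted order) —
-- the equivalence proved here is about the return value only.

-- ===== PORT A =====
-- A's calls into the stdlib 'heapq' module are ported as a functional min-heap (skew heap):
-- exact in everything A observes (the length, the minimum at the root, the value each heappop
-- returns); the internal arrangement of the heap is not observed by A's return value.
inductive PHeap : Type
  | nil : PHeap
  | node : Int → PHeap → PHeap → PHeap
deriving DecidableEq, Repr

def PHeap.merge : PHeap → PHeap → PHeap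
  | .nil, h => h
  | .node v l r, .nil => .node v l r
  | .node v1 l1 r1, .node v2 l2 r2 =>
    if v1 ≤ v2 then .node v1 (PHeap.merge (.node v2 l2 r2) r1) l1
    else .node v2 (PHeap.merge (.node v1 l1 r1) r2) l2
termination_by a b => sizeOf a + sizeOf b
decreasing_by all_goals (simp <;> omega)

def PHeap.push (h : PHeap) (x : Int) : PHeap := PHeap.merge (.node x .nil .nil) h

-- scoville[0] on the heap; the nil case is unreachable under Pre_solution (Python raises there)
def PHeap.root : PHeap → Int
  | .nil => 0
  | .node v _ _ => v

def PHeap.pop : PHeap → Int × PHeap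
  | .nil => (0, .nil)
  | .node v l r => (v, PHeap.merge l r)

def PHeap.size : PHeap → Nat
  | .nil => 0
  | .node _ l r => 1 + l.size + r.size

def pyHeapify (xs : List Int) : PHeap := xs.foldl PHeap.push .nil

-- A's 'while True' loop; each iteration removes one element, so fuel = initial length suffices
def solLoopA : Nat → Int → PHeap → Int → Int
  | 0, answer, _, _ => answer
  | f + 1, answer, h, K =>
    if h.size == 1 && decide (h.root < K) then -1
    else if K ≤ h.root then answer
    else
      let p1 := h.pop
      let p2 := p1.2.pop
      solLoopA f (answer + 1) (p2.2.push (p1.1 + p2.1 * 2)) K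

def solution (scoville : List Int) (K : Int) : Int :=
  solLoopA scoville.length 0 (pyHeapify scoville) K

-- ===== PORT B =====
-- B's inner scan-and-insert loop (find first index i with scoville[i] >= new, insert there)
def bIns : List Int → Int → List Int
  | [], x => [x]
  | y :: ys, x => if y < x then y :: bIns ys x else x :: y :: ys

-- B's 'while scoville[0] < K' loop; headD 0 is exact whenever the list is nonempty (the empty
-- list, where Python raises IndexError, is excluded by Pre_solution)
def solLoopB : Nat → Int → List Int → Int → Int
  | 0, answer, _, _ => answer
  | f + 1, answer, l, K =>
    if l.headD 0 < K then
      if l.length == 1 then -1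
      else
        match l with
        | x1 :: x2 :: rest => solLoopB f (answer + 1) (bIns rest (x1 + x2 * 2)) K
        | _ => answer
    else answer

def solution_alt (scoville : List Int) (K : Int) : Int :=
  solLoopB scoville.length 0 (PySem.List.sorted scoville (fun x => x) false) K

-- ===== PRECONDITION & SPEC =====
-- Pre_ excludes only the empty list, on which both A and B raise IndexError (scoville[0])
def Pre_solution (scoville : List Int) (K : Int) : Prop := scoville ≠ []
instance (scoville : List Int) (K : Int) : Decidable (Pre_solution scoville K) := by
  unfold Pre_solution; infer_instance

def pvWitness_solution : List Int × Int := ([1, 2, 3, 9, 10, 12], 7)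

def Spec_solution (scoville : List Int) (K : Int) (out : Int) : Prop := out = solution_alt scoville K
instance (scoville : List Int) (K : Int) (out : Int) : Decidable (Spec_solution scoville K out) := by
  unfold Spec_solution; infer_instance

-- ===== CLAIM (what is proved, stated in full; the proofs are below) =====
def Claim_equal_solution : Prop := ∀ (scoville : List Int) (K : Int), Dom_solution scoville K → Pre_solution scoville K → Spec_solution scoville K (solution scoville K)

-- ===== LEMMAS AND PROOFS =====

def PHeap.mset : PHeap → Multiset Int
  | .nil => 0
  | .node v l r => v ::ₘ (l.mset + r.mset)

def IsHeap : PHeap → Prop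
  | .nil => True
  | .node v l r => (∀ y ∈ l.mset, v ≤ y) ∧ (∀ y ∈ r.mset, v ≤ y) ∧ IsHeap l ∧ IsHeap r

theorem mset_merge (a b : PHeap) : (PHeap.merge a b).mset = a.mset + b.mset := by
  fun_induction PHeap.merge a b with
  | case1 h => simp [PHeap.mset]
  | case2 v l r => simp [PHeap.mset]
  | case3 v1 l1 r1 v2 l2 r2 hle ih =>
      simp only [PHeap.mset, ih, ← Multiset.singleton_add]; abel
  | case4 v1 l1 r1 v2 l2 r2 hle ih =>
      simp only [PHeap.mset, ih, ← Multiset.singleton_add]; abel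

theorem le_mset_of_isHeap (v : Int) (l r : PHeap) (h : IsHeap (.node v l r)) :
    ∀ y ∈ (PHeap.node v l r).mset, v ≤ y := by
  intro y hy
  simp only [PHeap.mset, Multiset.mem_cons, Multiset.mem_add] at hy
  rcases hy with rfl | hy | hy
  · exact le_refl _
  · exact h.1 y hy
  · exact h.2.1 y hy

theorem isHeap_merge (a b : PHeap) (ha : IsHeap a) (hb : IsHeap b) : IsHeap (PHeap.merge a b) := by
  fun_induction PHeap.merge a b with
  | case1 h => exact hb
  | case2 v l r => exact ha
  | case3 v1 l1 r1 v2 l2 r2 hle ih =>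
      refine ⟨?_, ha.1, ih hb ha.2.2.2, ha.2.2.1⟩
      intro y hy
      rw [mset_merge] at hy
      rcases Multiset.mem_add.mp hy with hy | hy
      · exact le_trans hle (le_mset_of_isHeap v2 l2 r2 hb y hy)
      · exact ha.2.1 y hy
  | case4 v1 l1 r1 v2 l2 r2 hle ih =>
      refine ⟨?_, hb.1, ih ha hb.2.2.2, hb.2.2.1⟩
      intro y hy
      rw [mset_merge] at hy
      rcases Multiset.mem_add.mp hy with hy | hy
      · exact le_trans (not_le.mp hle).le (le_mset_of_isHeap v1 l1 r1 ha y hy)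
      · exact hb.2.1 y hy

theorem mset_push (h : PHeap) (x : Int) : (h.push x).mset = x ::ₘ h.mset := by
  simp [PHeap.push, mset_merge, PHeap.mset]

theorem isHeap_push (h : PHeap) (x : Int) (hh : IsHeap h) : IsHeap (h.push x) := by
  refine isHeap_merge _ _ ?_ hh
  exact ⟨by simp [PHeap.mset], by simp [PHeap.mset], trivial, trivial⟩

theorem heapify_invariant (xs : List Int) (h : PHeap) (hh : IsHeap h) :
    IsHeap (xs.foldl PHeap.push h) ∧ (xs.foldl PHeap.push h).mset = h.mset + ↑xs := by
  induction xs generalizing h with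
  | nil => simp [hh]
  | cons x xs ih =>
      have h2 := ih (h.push x) (isHeap_push h x hh)
      simp only [List.foldl_cons]
      refine ⟨h2.1, ?_⟩
      rw [h2.2, mset_push]
      simp only [← Multiset.cons_coe, ← Multiset.singleton_add]
      abel

theorem size_eq_card (h : PHeap) : h.size = Multiset.card h.mset := by
  induction h with
  | nil => simp [PHeap.size, PHeap.mset]
  | node v l r ihl ihr => simp [PHeap.size, PHeap.mset, ihl, ihr]; omega

theorem coe_bIns (l : List Int) (x : Int) : ((bIns l x : List Int) : Multiset Int) = x ::ₘ ↑l := by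
  induction l with
  | nil => simp [bIns]
  | cons y ys ih =>
      by_cases hy : y < x
      · simp only [bIns, if_pos hy, ← Multiset.cons_coe, ih, Multiset.cons_swap]
      · simp [bIns, if_neg hy]

theorem bIns_ne_nil (l : List Int) (x : Int) : bIns l x ≠ [] := by
  cases l with
  | nil => simp [bIns]
  | cons y ys => simp only [bIns]; split <;> simp

theorem sorted_bIns (l : List Int) (x : Int) (hs : List.Sorted (· ≤ ·) l) :
    List.Sorted (· ≤ ·) (bIns l x) := by
  induction l with
  | nil => simp [bIns, List.sorted_singleton]
  | cons y ys ih =>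
      rw [List.sorted_cons] at hs
      by_cases hy : y < x
      · rw [bIns, if_pos hy, List.sorted_cons]
        refine ⟨?_, ih hs.2⟩
        intro b hb
        have : b ∈ (↑(bIns ys x) : Multiset Int) := by simpa using hb
        rw [coe_bIns] at this
        rcases Multiset.mem_cons.mp this with rfl | hb'
        · exact le_of_lt hy
        · exact hs.1 b (by simpa using hb')
      · rw [bIns, if_neg hy, List.sorted_cons]
        refine ⟨?_, List.sorted_cons.mpr hs⟩
        intro b hb
        rcases List.mem_cons.mp hb with rfl | hb'
        · exact not_lt.mp hy
        · exact le_trans (not_lt.mp hy) (hs.1 b hb')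

-- pop step: a heap whose multiset is that of a sorted nonempty list has the head at the root,
-- and popping it leaves a heap for the tail
theorem pop_head (h : PHeap) (x : Int) (t : List Int) (hH : IsHeap h)
    (hs : List.Sorted (· ≤ ·) (x :: t)) (hm : h.mset = ↑(x :: t)) :
    ∃ a b, h = .node x a b ∧ IsHeap (PHeap.merge a b) ∧ (PHeap.merge a b).mset = ↑t := by
  cases h with
  | nil => exfalso; simp [PHeap.mset] at hm; exact absurd hm.symm (by simp)
  | node v a b =>
      have hvmem : v ∈ (↑(x :: t) : Multiset Int) := by
        rw [← hm]; simp [PHeap.mset]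
      have hxv : x ≤ v := by
        rcases Multiset.mem_coe.mp hvmem with hv
        rcases List.mem_cons.mp hv with rfl | hv'
        · exact le_refl _
        · exact (List.sorted_cons.mp hs).1 v hv'
      have hxmem : x ∈ (PHeap.node v a b).mset := by rw [hm]; simp
      have hvx : v ≤ x := le_mset_of_isHeap v a b hH x hxmem
      have hvex : v = x := le_antisymm hvx hxv
      subst hvex
      refine ⟨a, b, rfl, isHeap_merge a b hH.2.2.1 hH.2.2.2, ?_⟩
      rw [mset_merge]
      have : v ::ₘ (a.mset + b.mset) = v ::ₘ (↑t : Multiset Int) := by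
        rw [← Multiset.cons_coe] at hm; exact hm
      exact (Multiset.cons_inj_right v).mp this

theorem loop_eq (f : Nat) : ∀ (answer : Int) (h : PHeap) (l : List Int) (K : Int),
    IsHeap h → List.Sorted (· ≤ ·) l → h.mset = ↑l → l ≠ [] →
    solLoopA f answer h K = solLoopB f answer l K := by
  induction f with
  | zero => intro answer h l K _ _ _ _; rfl
  | succ f ih =>
      intro answer h l K hH hs hm hne
      obtain ⟨x, t, rfl⟩ : ∃ x t, l = x :: t := by
        cases l with
        | nil => exact absurd rfl hne
        | cons x t => exact ⟨x, t, rfl⟩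
      obtain ⟨a, b, rfl, hH1, hm1⟩ := pop_head h x t hH hs hm
      have hsize : (PHeap.node x a b).size = t.length + 1 := by
        rw [size_eq_card, hm]; simp
      by_cases hxK : x < K
      · cases t with
        | nil =>
            simp [solLoopA, solLoopB, hsize, PHeap.root, hxK]
        | cons x2 rest =>
            obtain ⟨a2, b2, heq2, hH2, hm2⟩ :=
              pop_head (PHeap.merge a b) x2 rest hH1 (List.sorted_cons.mp hs).2 hm1
            have hg1 : ((PHeap.node x a b).size == 1 && decide ((PHeap.node x a b).root < K)) = false := by
              simp [hsize]
            have hg2 : ¬ (K ≤ (PHeap.node x a b).root) := by simp [PHeap.root]; exact hxK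
            rw [solLoopA, solLoopB, hg1]
            simp only [Bool.false_eq_true, if_false, hg2, List.headD, if_pos hxK]
            have hlen : ((x :: x2 :: rest).length == 1) = false := by simp
            rw [hlen]
            simp only [Bool.false_eq_true, if_false, PHeap.pop, heq2]
            exact ih (answer + 1) _ _ K
              (isHeap_push _ _ hH2)
              (sorted_bIns rest (x + x2 * 2) ((List.sorted_cons.mp (List.sorted_cons.mp hs).2).2))
              (by rw [mset_push, hm2, coe_bIns])
              (bIns_ne_nil rest (x + x2 * 2))
      · cases t with
        | nil => simp [solLoopA, solLoopB, PHeap.root, hxK, not_lt.mp hxK]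
        | cons x2 rest => simp [solLoopA, solLoopB, PHeap.root, hxK, not_lt.mp hxK]

-- ===== VERDICT (by name: the statement is the Claim_ definition above) =====
theorem solution_spec : Claim_equal_solution := by
  intro scoville K _dom pre
  unfold Spec_solution solution solution_alt
  have hinv := heapify_invariant scoville PHeap.nil trivial
  refine loop_eq scoville.length 0 (pyHeapify scoville)
    (PySem.List.sorted scoville (fun x => x) false) K hinv.1 ?_ ?_ ?_
  · have := PySem.List.sorted_pairwise (xs := scoville) (key := fun x => x)
    simpa [List.Sorted] using this
  · rw [pyHeapify, hinv.2]
    simp [PHeap.mset]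
    exact (PySem.List.sorted_perm scoville (fun x => x) false).symm
  · simpa [PySem.List.sorted_eq_nil_iff] using pre
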